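-- pv_equiv track=rewrite | github.com/danielburgess/Mesen2-Diz | tools/export_sbd_font.py | vram_to_tiles_2bpp
-- ===== SOURCE A (Python) =====
-- def vram_to_tiles_2bpp(vram, base_addr, num_tiles):
--     """Decode 2bpp SNES tiles from VRAM words. Returns list of 8x8 pixel arrays."""
--     tiles = []
--     for t in range(num_tiles):
--         tile_start = base_addr + t * 8  # 8 words per 2bpp tile
--         tile_bytes = []
--         for w in range(8):
--             word = vram.get(tile_start + w, 0)
--             tile_bytes.append(word & 0xFF)
--             tile_bytes.append((word >> 8) & 0xFF)
--
--         pixels = []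
--         for row in range(8):
--             bp0 = tile_bytes[row * 2]
--             bp1 = tile_bytes[row * 2 + 1]
--             row_px = []
--             for bit in range(7, -1, -1):
--                 p = ((bp0 >> bit) & 1) | (((bp1 >> bit) & 1) << 1)
--                 row_px.append(p)
--             pixels.append(row_px)
--         tiles.append(pixels)
--     return tiles
-- ===== SOURCE B (Python) =====
-- def vram_to_tiles_2bpp(vram, base_addr, num_tiles):
--     """Decode 2bpp SNES tiles from VRAM words. Returns list of 8x8 pixel arrays."""
--     # Precomputed table: for each byte value, its 8 bits msb-first. The per-pixel
--     # bit extraction of the inner loop disappears: a row is one table lookup per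
--     # bitplane plus a zip combining the two planes arithmetically.
--     BITS = [[(b >> s) & 1 for s in range(7, -1, -1)] for b in range(256)]
--
--     def decode_row(word):
--         return [lo + 2 * hi
--                 for lo, hi in zip(BITS[word & 0xFF], BITS[(word >> 8) & 0xFF])]
--
--     return [[decode_row(vram.get(base_addr + 8 * t + row, 0)) for row in range(8)]
--             for t in range(num_tiles)]
-- ===== Notes on version B (the rewrite author's own statement) =====
-- stated objective: alternative
-- what changed: Replaces A's per-pixel bit-extraction inner loop (and its intermediate 16-entry tile_bytes list) by a 256-entry precomputed bit table: each row is decoded by two table lookups, one per bitplane, combined with a zip, so no per-pixel shifting remains in the main loop.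
import Mathlib
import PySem

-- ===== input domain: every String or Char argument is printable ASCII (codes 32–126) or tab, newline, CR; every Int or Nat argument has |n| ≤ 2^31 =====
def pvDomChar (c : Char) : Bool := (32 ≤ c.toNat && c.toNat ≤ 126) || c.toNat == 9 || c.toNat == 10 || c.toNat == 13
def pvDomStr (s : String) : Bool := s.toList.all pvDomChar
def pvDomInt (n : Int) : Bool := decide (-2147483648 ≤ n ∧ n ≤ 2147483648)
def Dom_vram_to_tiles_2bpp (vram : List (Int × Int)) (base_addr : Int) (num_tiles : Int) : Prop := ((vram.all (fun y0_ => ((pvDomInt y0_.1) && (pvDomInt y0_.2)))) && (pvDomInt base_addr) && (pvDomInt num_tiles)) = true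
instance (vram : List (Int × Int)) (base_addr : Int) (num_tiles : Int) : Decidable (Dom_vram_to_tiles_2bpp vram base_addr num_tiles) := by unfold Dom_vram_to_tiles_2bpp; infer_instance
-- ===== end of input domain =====

-- B replaces A's per-pixel bit-extraction loop by a precomputed 256-entry bit table:
-- a row becomes two table lookups (one per bitplane) combined by a zip (objective: alternative).

-- ===== PORT A =====
-- literal transliteration of A; `>>`/`&`/`|` via PySem.Int bitwise ops; `bit.toNat` is exact
-- here since the range 7..0 only produces nonnegative values.
def vram_to_tiles_2bpp (vram : List (Int × Int)) (base_addr : Int) (num_tiles : Int) : List (List (List Int)) :=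
  (PySem.List.pyRange 0 num_tiles 1).foldl (fun tiles t =>
    let tile_start := base_addr + t * 8
    let tile_bytes := (PySem.List.pyRange 0 8 1).foldl (fun acc w =>
      let word := PySem.Dict.getD (PySem.Dict.mk vram) (tile_start + w) 0
      (acc ++ [PySem.Int.band word 255]) ++ [PySem.Int.band (word >>> (8 : Nat)) 255]) []
    let pixels := (PySem.List.pyRange 0 8 1).foldl (fun px row =>
      let bp0 := PySem.List.pyGetD tile_bytes (row * 2) 0
      let bp1 := PySem.List.pyGetD tile_bytes (row * 2 + 1) 0
      let row_px := (PySem.List.pyRange 7 (-1) (-1)).foldl (fun r bit =>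
        r ++ [PySem.Int.bor (PySem.Int.band (bp0 >>> bit.toNat) 1)
                ((PySem.Int.band (bp1 >>> bit.toNat) 1) <<< (1 : Nat))]) []
      px ++ [row_px]) []
    tiles ++ [pixels]) []

-- ===== PORT B =====
-- the precomputed table: for each byte value 0..255, its 8 bits msb-first
def pvByteBits (b : Int) : List Int :=
  (PySem.List.pyRange 7 (-1) (-1)).map (fun s => PySem.Int.band (b >>> s.toNat) 1)

def pvBITS : List (List Int) :=
  (PySem.List.pyRange 0 256 1).map pvByteBits

-- decode_row: two table lookups (list indexing; indices are masked to 0..255, always in range,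
-- so pyGetD's default is never used) and a zip combining the planes
def decode_row_alt (BITS : List (List Int)) (word : Int) : List Int :=
  (List.zip (PySem.List.pyGetD BITS (PySem.Int.band word 255) [])
            (PySem.List.pyGetD BITS (PySem.Int.band (word >>> (8 : Nat)) 255) [])).map
    (fun p => p.1 + 2 * p.2)

def vram_to_tiles_2bpp_alt (vram : List (Int × Int)) (base_addr : Int) (num_tiles : Int) : List (List (List Int)) :=
  let BITS := pvBITS
  (PySem.List.pyRange 0 num_tiles 1).map (fun t =>
    (PySem.List.pyRange 0 8 1).map (fun row =>
      decode_row_alt BITS (PySem.Dict.getD (PySem.Dict.mk vram) (base_addr + 8 * t + row) 0)))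

-- ===== PRECONDITION & SPEC =====
def Spec_vram_to_tiles_2bpp (vram : List (Int × Int)) (base_addr : Int) (num_tiles : Int) (out : List (List (List Int))) : Prop := out = vram_to_tiles_2bpp_alt vram base_addr num_tiles
instance (vram : List (Int × Int)) (base_addr : Int) (num_tiles : Int) (out : List (List (List Int))) : Decidable (Spec_vram_to_tiles_2bpp vram base_addr num_tiles out) := by unfold Spec_vram_to_tiles_2bpp; infer_instance

-- ===== CLAIM (what is proved, stated in full; the proofs are below) =====
def Claim_equal_vram_to_tiles_2bpp : Prop := ∀ (vram : List (Int × Int)) (base_addr : Int) (num_tiles : Int), Dom_vram_to_tiles_2bpp vram base_addr num_tiles → Spec_vram_to_tiles_2bpp vram base_addr num_tiles (vram_to_tiles_2bpp vram base_addr num_tiles)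

-- ===== LEMMAS AND PROOFS =====

-- a & 0xFF always lands in [0, 256)
lemma band255_range (a : Int) : 0 ≤ PySem.Int.band a 255 ∧ PySem.Int.band a 255 < 256 := by
  unfold PySem.Int.band
  have h255 : (255 : Int).toNat = 255 := rfl
  split_ifs with h1 h2 h2
  · have h := Nat.and_le_right (n := a.toNat) (m := (255 : Int).toNat)
    rw [h255] at h ⊢
    omega
  · omega
  · have h := Nat.sub_le ((255 : Int).toNat) (((255 : Int)).toNat &&& (-a - 1).toNat)
    rw [h255] at h ⊢
    omega
  · omega

-- table lookup at an in-range index yields the bit list of that index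
lemma pvBITS_lookup (x : Int) (h0 : 0 ≤ x) (h1 : x < 256) :
    PySem.List.pyGetD pvBITS x [] = pvByteBits x := by
  unfold pvBITS
  exact PySem.List.pyGetD_map_pyRange_of_nonneg _ _ _ _ h0 h1

-- combining two single-bit values with `|` and a shift equals the arithmetic combination
lemma bor01 (a b : Int) :
    PySem.Int.bor (PySem.Int.band a 1) ((PySem.Int.band b 1) <<< (1 : Nat)) =
      PySem.Int.band a 1 + 2 * PySem.Int.band b 1 := by
  rw [PySem.Int.band_one, PySem.Int.band_one]
  have ha0 := PySem.Int.mod_nonneg a (b := 2) (by norm_num)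
  have ha1 := PySem.Int.mod_lt a (b := 2) (by norm_num)
  have hb0 := PySem.Int.mod_nonneg b (b := 2) (by norm_num)
  have hb1 := PySem.Int.mod_lt b (b := 2) (by norm_num)
  have ha : PySem.Int.mod a 2 = 0 ∨ PySem.Int.mod a 2 = 1 := by omega
  have hb : PySem.Int.mod b 2 = 0 ∨ PySem.Int.mod b 2 = 1 := by omega
  rcases ha with h | h <;> rcases hb with h' | h' <;> rw [h, h'] <;> decide

-- A's inner bit loop over one word equals B's table-lookup row decode
lemma row_eq (word : Int) :
    (PySem.List.pyRange 7 (-1) (-1)).foldl (fun r bit =>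
        r ++ [PySem.Int.bor (PySem.Int.band ((PySem.Int.band word 255) >>> bit.toNat) 1)
                ((PySem.Int.band ((PySem.Int.band (word >>> (8 : Nat)) 255) >>> bit.toNat) 1) <<< (1 : Nat))]) []
      = decode_row_alt pvBITS word := by
  obtain ⟨h0, h1⟩ := band255_range word
  obtain ⟨h0', h1'⟩ := band255_range (word >>> (8 : Nat))
  unfold decode_row_alt
  rw [pvBITS_lookup _ h0 h1, pvBITS_lookup _ h0' h1']
  unfold pvByteBits
  simp only [show PySem.List.pyRange 7 (-1) (-1) = [7, 6, 5, 4, 3, 2, 1, 0] from rfl,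
    List.map, List.zip_cons_cons, List.zip_nil_right, List.foldl, bor01]
  rfl

-- per-tile: A's build-tile_bytes-then-index computation equals B's table-decoded tile
lemma tile_eq (vram : List (Int × Int)) (base_addr t : Int) :
    (let tile_start := base_addr + t * 8
     let tile_bytes := (PySem.List.pyRange 0 8 1).foldl (fun acc w =>
       let word := PySem.Dict.getD (PySem.Dict.mk vram) (tile_start + w) 0
       (acc ++ [PySem.Int.band word 255]) ++ [PySem.Int.band (word >>> (8 : Nat)) 255]) []
     (PySem.List.pyRange 0 8 1).foldl (fun px row =>
       let bp0 := PySem.List.pyGetD tile_bytes (row * 2) 0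
       let bp1 := PySem.List.pyGetD tile_bytes (row * 2 + 1) 0
       let row_px := (PySem.List.pyRange 7 (-1) (-1)).foldl (fun r bit =>
         r ++ [PySem.Int.bor (PySem.Int.band (bp0 >>> bit.toNat) 1)
                 ((PySem.Int.band (bp1 >>> bit.toNat) 1) <<< (1 : Nat))]) []
       px ++ [row_px]) []) =
    (PySem.List.pyRange 0 8 1).map (fun row =>
      decode_row_alt pvBITS (PySem.Dict.getD (PySem.Dict.mk vram) (base_addr + 8 * t + row) 0)) := by
  have hkey : ∀ w : Int, base_addr + t * 8 + w = base_addr + 8 * t + w := by intro w; ring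
  simp only [show PySem.List.pyRange 0 8 1 = [0, 1, 2, 3, 4, 5, 6, 7] from rfl,
    List.foldl, List.map, hkey]
  norm_num [PySem.List.pyGetD, PySem.List.pyGet?, PySem.List.pyIdx?, -List.foldl_append_eq_append, -Int.ofNat_toNat]
  norm_num [show Int.toNat 0 = 0 from rfl, show Int.toNat 1 = 1 from rfl, show Int.toNat 2 = 2 from rfl, show Int.toNat 3 = 3 from rfl, show Int.toNat 4 = 4 from rfl, show Int.toNat 5 = 5 from rfl, show Int.toNat 6 = 6 from rfl, show Int.toNat 7 = 7 from rfl, show Int.toNat 8 = 8 from rfl, show Int.toNat 9 = 9 from rfl, show Int.toNat 10 = 10 from rfl, show Int.toNat 11 = 11 from rfl, show Int.toNat 12 = 12 from rfl, show Int.toNat 13 = 13 from rfl, show Int.toNat 14 = 14 from rfl, show Int.toNat 15 = 15 from rfl, List.getElem_cons_succ, List.getElem_cons_zero, row_eq, -List.foldl_append_eq_append, -Int.ofNat_toNat]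

-- ===== VERDICT (by name: the statement is the Claim_ definition above) =====
theorem vram_to_tiles_2bpp_spec : Claim_equal_vram_to_tiles_2bpp := by
  intro vram base_addr num_tiles _
  unfold Spec_vram_to_tiles_2bpp vram_to_tiles_2bpp vram_to_tiles_2bpp_alt
  rw [PySem.List.foldl_append_singleton_eq_map]
  exact List.map_congr_left (fun t _ => tile_eq vram base_addr t)
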